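-- pv_equiv track=rewrite | github.com/Kevinbarre/advent-of-code-2020 | Day12/ex12_1.py | process
-- ===== SOURCE A (Python) =====
-- DIRECTIONS = ['E', 'N', 'W', 'S']
--
-- def process(old_x, old_y, old_facing, instruction):
--     action, value = instruction
--
--     if action == 'N':
--         # Move top
--         old_y += value
--     elif action == 'S':
--         # Move down
--         old_y -= value
--     elif action == 'E':
--         # Move right
--         old_x += value
--     elif action == 'W':
--         # Move left
--         old_x -= value
--     elif action == 'L':
--         # Rotate left
--         old_facing = rotate(old_facing, value)
--     elif action == 'R':
--         # Rotate right
--         old_facing = rotate(old_facing, -value)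
--     elif action == 'F':
--         # Move forward
--         new_instruction = (DIRECTIONS[old_facing], value)
--         return process(old_x, old_y, old_facing, new_instruction)
--     return old_x, old_y, old_facing
--
-- def rotate(old_facing, value):
--     index_increment = int(value / 90)
--     return (old_facing + index_increment) % 4
-- ===== SOURCE B (Python) =====
-- COMPASS = ['E', 'N', 'W', 'S']
--
--
-- def process(old_x, old_y, old_facing, instruction):
--     action, value = instruction
--     # Reduce every move to a quarter-turn count d: the unit vector for direction d
--     # is (1, 0) rotated 90 degrees left d times -- no delta table, no branch per letter.
--     if action == 'F':
--         d = old_facing % 4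
--     elif action in COMPASS:
--         d = COMPASS.index(action)
--     else:
--         d = None
--     if d is not None:
--         ux, uy = 1, 0
--         for _ in range(d):
--             ux, uy = -uy, ux
--         return old_x + ux * value, old_y + uy * value, old_facing
--     if action == 'L' or action == 'R':
--         step = int(value / 90)
--         if action == 'R':
--             step = -step
--         return old_x, old_y, (old_facing + step) % 4
--     return old_x, old_y, old_facing
-- ===== Notes on version B (the rewrite author's own statement) =====
-- stated objective: alternative
-- what changed: B eliminates both A's per-letter elif chain and its recursive 'F' call: every move (compass or forward) is reduced to a quarter-turn count d, the unit vector is generated by iterating the 90-degree rotation (ux,uy)->(-uy,ux) d times from (1,0), and one vector addition applies the move; rotation is inlined arithmetic on (old_facing + sign*int(value/90)) % 4.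
import Mathlib
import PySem

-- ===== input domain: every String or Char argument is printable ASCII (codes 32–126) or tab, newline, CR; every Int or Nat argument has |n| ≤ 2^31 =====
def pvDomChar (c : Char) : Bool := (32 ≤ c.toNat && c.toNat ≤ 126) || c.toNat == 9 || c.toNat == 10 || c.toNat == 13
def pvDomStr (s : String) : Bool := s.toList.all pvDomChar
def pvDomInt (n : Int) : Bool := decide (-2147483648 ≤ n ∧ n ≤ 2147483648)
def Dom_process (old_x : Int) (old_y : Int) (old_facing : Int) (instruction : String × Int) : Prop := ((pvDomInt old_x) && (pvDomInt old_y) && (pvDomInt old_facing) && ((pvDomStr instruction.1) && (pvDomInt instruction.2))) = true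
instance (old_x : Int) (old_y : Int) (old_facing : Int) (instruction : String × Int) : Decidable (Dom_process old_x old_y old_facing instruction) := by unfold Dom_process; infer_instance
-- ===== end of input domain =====

-- B is an ALTERNATIVE decomposition: it reduces every move ('F' included, no recursion) to a
-- quarter-turn count d and generates the unit vector by iterating the 90° rotation
-- (ux,uy) ↦ (-uy,ux) d times from (1,0); int(value/90) is ported as truncating division
-- (exact: |value| ≤ 2^31 < 2^53, so Python's float division of it by 90 is exact enough to truncate).

-- ===== PORT A =====
def DIRECTIONS : List String := ["E", "N", "W", "S"]

def rotate (old_facing : Int) (value : Int) : Int :=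
  let index_increment := PySem.Int.truncdiv value 90
  PySem.Int.mod (old_facing + index_increment) 4

-- action, value = instruction (written as instruction.1 / instruction.2)
def process (old_x : Int) (old_y : Int) (old_facing : Int) (instruction : String × Int) : Int × Int × Int :=
  if instruction.1 = "N" then (old_x, old_y + instruction.2, old_facing)
  else if instruction.1 = "S" then (old_x, old_y - instruction.2, old_facing)
  else if instruction.1 = "E" then (old_x + instruction.2, old_y, old_facing)
  else if instruction.1 = "W" then (old_x - instruction.2, old_y, old_facing)
  else if instruction.1 = "L" then (old_x, old_y, rotate old_facing instruction.2)
  else if instruction.1 = "R" then (old_x, old_y, rotate old_facing (-instruction.2))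
  else if instruction.1 = "F" then
    -- DIRECTIONS[old_facing]: raises IndexError out of range (excluded by Pre_); default "" there
    process old_x old_y old_facing ((PySem.List.pyGet? DIRECTIONS old_facing).getD "", instruction.2)
  else (old_x, old_y, old_facing)
termination_by (if instruction.1 = "F" then 1 else 0 : Nat)
decreasing_by
  have hd : (PySem.List.pyGet? DIRECTIONS old_facing).getD "" ≠ "F" := by
    rcases hg : PySem.List.pyGet? DIRECTIONS old_facing with _ | d
    · simp
    · have hm := PySem.List.mem_of_pyGet?_eq_some DIRECTIONS hg
      simp [DIRECTIONS] at hm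
      rcases hm with h | h | h | h <;> simp [h]
  rename_i hF
  simp [hd, hF]

-- ===== PORT B =====
-- Source B's DIRECTIONS is the same literal list as A's DIRECTIONS; shared here to avoid a duplicate.

def process_alt (old_x : Int) (old_y : Int) (old_facing : Int) (instruction : String × Int) : Int × Int × Int :=
  let action := instruction.1
  let value := instruction.2
  let d : Option Nat :=
    if action = "F" then some (PySem.Int.mod old_facing 4).toNat  -- old_facing % 4 ∈ [0,3]
    else PySem.List.index? DIRECTIONS action
  match d with
  | some k =>
    let u := (List.range k).foldl (fun (u : Int × Int) _ => (-u.2, u.1)) (1, 0)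
    (old_x + u.1 * value, old_y + u.2 * value, old_facing)
  | none =>
    if action = "L" ∨ action = "R" then
      let step := PySem.Int.truncdiv value 90
      let step := if action = "R" then -step else step
      (old_x, old_y, PySem.Int.mod (old_facing + step) 4)
    else (old_x, old_y, old_facing)

-- ===== PRECONDITION & SPEC =====
-- Pre_ excludes only the inputs where A raises IndexError: an 'F' instruction with old_facing
-- outside [-4, 4), where DIRECTIONS[old_facing] is out of range.
def Pre_process (old_x : Int) (old_y : Int) (old_facing : Int) (instruction : String × Int) : Prop :=
  instruction.1 = "F" → (-4 ≤ old_facing ∧ old_facing < 4)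
instance (old_x : Int) (old_y : Int) (old_facing : Int) (instruction : String × Int) : Decidable (Pre_process old_x old_y old_facing instruction) := by unfold Pre_process; infer_instance

def pvWitness_process : Int × Int × Int × (String × Int) := (3, 7, 2, ("F", 10))

def Spec_process (old_x : Int) (old_y : Int) (old_facing : Int) (instruction : String × Int) (out : Int × Int × Int) : Prop := out = process_alt old_x old_y old_facing instruction
instance (old_x : Int) (old_y : Int) (old_facing : Int) (instruction : String × Int) (out : Int × Int × Int) : Decidable (Spec_process old_x old_y old_facing instruction out) := by unfold Spec_process; infer_instance

-- ===== CLAIM =====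
def Claim_equal_process : Prop := ∀ (old_x : Int) (old_y : Int) (old_facing : Int) (instruction : String × Int), Dom_process old_x old_y old_facing instruction → Pre_process old_x old_y old_facing instruction → Spec_process old_x old_y old_facing instruction (process old_x old_y old_facing instruction)

-- ===== LEMMAS AND PROOFS =====
-- one unfolding of A's port on a non-'F' action
theorem pstep (x y f v : Int) (a : String) (ha : a ≠ "F") :
    process x y f (a, v) =
      if a = "N" then (x, y + v, f)
      else if a = "S" then (x, y - v, f)
      else if a = "E" then (x + v, y, f)
      else if a = "W" then (x - v, y, f)
      else if a = "L" then (x, y, rotate f v)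
      else if a = "R" then (x, y, rotate f (-v))
      else (x, y, f) := by
  rw [process]
  simp [ha]

-- one unfolding of A's port on 'F': the recursive call with the looked-up direction
theorem process_F (x y f v : Int) :
    process x y f ("F", v) =
      process x y f ((PySem.List.pyGet? DIRECTIONS f).getD "", v) := by
  rw [process]
  simp

theorem truncdiv_neg (v : Int) : PySem.Int.truncdiv (-v) 90 = -PySem.Int.truncdiv v 90 := by
  unfold PySem.Int.truncdiv
  simp [Int.neg_tdiv]

-- ===== VERDICT =====
theorem process_spec : Claim_equal_process := by
  intro x y f ins _hDom hPre
  unfold Spec_process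
  obtain ⟨a, v⟩ := ins
  by_cases hF : a = "F"
  · subst hF
    obtain ⟨h1, h2⟩ := hPre rfl
    interval_cases f <;>
      rw [process_F, pstep _ _ _ _ _ (by decide)] <;>
      simp [process_alt, DIRECTIONS, PySem.List.pyGet?, PySem.List.pyIdx?,
            PySem.Int.mod, List.range_succ] <;> ring
  have iE : List.idxOf? "E" DIRECTIONS = some 0 := by decide
  have iN : List.idxOf? "N" DIRECTIONS = some 1 := by decide
  have iW : List.idxOf? "W" DIRECTIONS = some 2 := by decide
  have iS : List.idxOf? "S" DIRECTIONS = some 3 := by decide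
  by_cases hN : a = "N"
  · rw [pstep _ _ _ _ _ (by simp [hN])]
    simp [process_alt, hN, iN, List.range_succ]
  by_cases hS : a = "S"
  · rw [pstep _ _ _ _ _ (by simp [hS])]
    simp [process_alt, hS, iS, List.range_succ]
    ring
  by_cases hE : a = "E"
  · rw [pstep _ _ _ _ _ (by simp [hE])]
    simp [process_alt, hE, iE]
  by_cases hW : a = "W"
  · rw [pstep _ _ _ _ _ (by simp [hW])]
    simp [process_alt, hW, iW, List.range_succ]
    ring
  · have gnone : List.idxOf? a DIRECTIONS = none := by
      rw [← PySem.List.index?_eq_idxOf?, PySem.List.index?_eq_none_iff]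
      simp [DIRECTIONS]
      exact ⟨hE, hN, hW, hS⟩
    rw [pstep _ _ _ _ _ hF]
    have iL : List.idxOf? "L" DIRECTIONS = none := by decide
    have iR : List.idxOf? "R" DIRECTIONS = none := by decide
    by_cases hL : a = "L"
    · simp [process_alt, hL, iL, rotate, PySem.Int.mod]
    by_cases hR : a = "R"
    · simp [process_alt, hR, iR, rotate, PySem.Int.mod, truncdiv_neg]
    · simp [process_alt, hN, hS, hE, hW, hF, hL, hR, gnone]
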